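-- pv_equiv track=rewrite | github.com/Joao-Palma/2023-2024 | xadrez.py | obtem_diag
-- ===== SOURCE A (Python) =====
-- def obtem_diag(Lin: int, Col: int) -> list:
--     """
--     Recebe coordenadas e devolve uma lista de listas com as coordenadas \n
--     das casas na diagonal da mesma
--
--     Returns: [ [inf_esq], [inf_dir], [sup_esq], [sup_dir] ]
--     """
--     List_ele_sup_dir = []
--     List_ele_sup_esq = []
--     List_ele_inf_dir = []
--     List_ele_inf_esq = []
--     Cond = True
--     ind_lin = Lin
--     ind_col = Col
--
--     if Lin != 1 or Col != 8:
--         while Cond: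
--             if(
--                 ind_col == 8
--                 or ind_lin == 1
--                 ):
--                 Cond = False
--             else:
--                 ind_col += 1
--                 ind_lin -= 1
--                 List_ele_sup_dir += [(ind_lin, ind_col)]
--
--     Cond = True
--     ind_lin = Lin
--     ind_col = Col
--
--     if Lin != 1 or Col != 1:
--         while Cond:
--             if(
--                 ind_col == 1
--                 or ind_lin == 1
--                 ):
--                 Cond = False
--             else:
--                 ind_col -= 1
--                 ind_lin -= 1
--                 List_ele_sup_esq += [(ind_lin, ind_col)]
--
--     Cond = True
--     ind_lin = Lin
--     ind_col = Col
--
--     if Lin != 8 or Col != 8: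
--         while Cond:
--             if(
--                 ind_col == 8
--                 or ind_lin == 8
--                 ):
--                 Cond = False
--             else:
--                 ind_col += 1
--                 ind_lin += 1
--                 List_ele_inf_dir += [(ind_lin, ind_col)]
--
--     Cond = True
--     ind_lin = Lin
--     ind_col = Col
--
--     if Lin != 8 or Col != 1:
--         while Cond:
--             if(
--                 ind_col == 1
--                 or ind_lin == 8
--                 ):
--                 Cond = False
--             else:
--                 ind_col -= 1
--                 ind_lin += 1
--                 List_ele_inf_esq += [(ind_lin, ind_col)]
--
--     return [List_ele_inf_esq, List_ele_inf_dir, List_ele_sup_esq, List_ele_sup_dir]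
-- ===== SOURCE B (Python) =====
-- def _steps(d1, d2):
--     """Number of loop steps: the nearest stopping edge that lies ahead.
--     Raises ValueError if neither does (where the original would not terminate)."""
--     return min(d for d in (d1, d2) if d >= 0)
--
--
-- def obtem_diag(Lin: int, Col: int) -> list:
--     """Diagonal coordinates from (Lin, Col): [inf_esq, inf_dir, sup_esq, sup_dir]."""
--     inf_esq = [(Lin + k, Col - k) for k in range(1, _steps(Col - 1, 8 - Lin) + 1)]
--     inf_dir = [(Lin + k, Col + k) for k in range(1, _steps(8 - Col, 8 - Lin) + 1)]
--     sup_esq = [(Lin - k, Col - k) for k in range(1, _steps(Col - 1, Lin - 1) + 1)]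
--     sup_dir = [(Lin - k, Col + k) for k in range(1, _steps(8 - Col, Lin - 1) + 1)]
--     return [inf_esq, inf_dir, sup_esq, sup_dir]
-- ===== Notes on version B (the rewrite author's own statement) =====
-- stated objective: simpler
-- what changed: Replaces A's four sentinel-checked while loops with mutable cursor state by precomputing the distance to the nearest edge per direction (min of two edge gaps) and building each diagonal with a single range comprehension.
import Mathlib
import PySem

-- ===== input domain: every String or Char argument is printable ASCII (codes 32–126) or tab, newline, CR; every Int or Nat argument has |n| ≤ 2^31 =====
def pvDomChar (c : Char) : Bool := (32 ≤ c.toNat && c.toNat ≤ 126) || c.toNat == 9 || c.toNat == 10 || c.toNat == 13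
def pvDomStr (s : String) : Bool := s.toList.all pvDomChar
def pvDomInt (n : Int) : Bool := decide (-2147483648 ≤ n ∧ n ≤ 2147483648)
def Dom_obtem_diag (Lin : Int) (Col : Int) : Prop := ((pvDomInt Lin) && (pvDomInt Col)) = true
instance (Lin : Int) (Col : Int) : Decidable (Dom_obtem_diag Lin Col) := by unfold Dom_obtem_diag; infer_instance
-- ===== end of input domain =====

-- B replaces A's four sentinel-checked while loops by precomputing each direction's
-- step count (nearest stopping edge ahead) and building the lists with range
-- comprehensions (objective: simpler); equivalence is on the inputs where A terminates.

-- ===== PORT A =====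
-- A's while loop, one shape for all four directions: condition `ind_col == stopCol
-- or ind_lin == stopLin`, step `ind_col += dc; ind_lin += dl`, append (ind_lin, ind_col).
-- Fueled transliteration: on inputs satisfying Pre_ (where Python A terminates) the
-- fuel 2^33 exceeds the number of iterations for every |Lin|,|Col| ≤ 2^31, so it is
-- never exhausted there; outside Pre_ Python A's loop never terminates.
def pyWhileDiag (fuel : Nat) (stopCol stopLin dc dl : Int)
    (ind_lin ind_col : Int) (acc : List (Int × Int)) : List (Int × Int) :=
  match fuel with
  | 0 => acc
  | f + 1 =>
    if ind_col = stopCol ∨ ind_lin = stopLin then acc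
    else pyWhileDiag f stopCol stopLin dc dl (ind_lin + dl) (ind_col + dc)
           (acc ++ [(ind_lin + dl, ind_col + dc)])

def obtem_diag (Lin : Int) (Col : Int) : List (List (Int × Int)) :=
  let sup_dir := if Lin ≠ 1 ∨ Col ≠ 8 then pyWhileDiag 8589934592 8 1 1 (-1) Lin Col [] else []
  let sup_esq := if Lin ≠ 1 ∨ Col ≠ 1 then pyWhileDiag 8589934592 1 1 (-1) (-1) Lin Col [] else []
  let inf_dir := if Lin ≠ 8 ∨ Col ≠ 8 then pyWhileDiag 8589934592 8 8 1 1 Lin Col [] else []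
  let inf_esq := if Lin ≠ 8 ∨ Col ≠ 1 then pyWhileDiag 8589934592 1 8 (-1) 1 Lin Col [] else []
  [inf_esq, inf_dir, sup_esq, sup_dir]

-- ===== PORT B =====
-- Source B's _steps: min over the nonnegative candidates; Python's min raises ValueError
-- when the generator is empty (both candidates negative) — there (outside Pre_) the
-- port returns the Option default 0.
def stepsB (d1 d2 : Int) : Int :=
  (PySem.List.min? (([d1, d2]).filter (fun d => decide (0 ≤ d))) (fun x => x)).getD 0

def obtem_diag_alt (Lin : Int) (Col : Int) : List (List (Int × Int)) :=
  let inf_esq := (PySem.List.pyRange 1 (stepsB (Col - 1) (8 - Lin) + 1) 1).map (fun k => (Lin + k, Col - k))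
  let inf_dir := (PySem.List.pyRange 1 (stepsB (8 - Col) (8 - Lin) + 1) 1).map (fun k => (Lin + k, Col + k))
  let sup_esq := (PySem.List.pyRange 1 (stepsB (Col - 1) (Lin - 1) + 1) 1).map (fun k => (Lin - k, Col - k))
  let sup_dir := (PySem.List.pyRange 1 (stepsB (8 - Col) (Lin - 1) + 1) 1).map (fun k => (Lin - k, Col + k))
  [inf_esq, inf_dir, sup_esq, sup_dir]

-- ===== PRECONDITION & SPEC =====
-- Pre_: exactly the inputs on which Python A terminates (each of its four while
-- loops has a sentinel ahead); outside it A loops forever and B raises ValueError.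
def Pre_obtem_diag (Lin : Int) (Col : Int) : Prop :=
  (1 ≤ Lin ∧ Lin ≤ 8) ∨ (1 ≤ Col ∧ Col ≤ 8)
instance (Lin : Int) (Col : Int) : Decidable (Pre_obtem_diag Lin Col) := by
  unfold Pre_obtem_diag; infer_instance
def pvWitness_obtem_diag : Int × Int := (4, 5)

def Spec_obtem_diag (Lin : Int) (Col : Int) (out : List (List (Int × Int))) : Prop := out = obtem_diag_alt Lin Col
instance (Lin : Int) (Col : Int) (out : List (List (Int × Int))) : Decidable (Spec_obtem_diag Lin Col out) := by unfold Spec_obtem_diag; infer_instance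

-- ===== CLAIM (what is proved, stated in full; the proofs are below) =====
def Claim_equal_obtem_diag : Prop := ∀ (Lin : Int) (Col : Int), Dom_obtem_diag Lin Col → Pre_obtem_diag Lin Col → Spec_obtem_diag Lin Col (obtem_diag Lin Col)

-- ===== LEMMAS AND PROOFS =====

-- stepsB as a plain arithmetic if-expression
theorem stepsB_eq (d1 d2 : Int) :
    stepsB d1 d2 =
      if 0 ≤ d1 then (if 0 ≤ d2 then min d1 d2 else d1)
      else (if 0 ≤ d2 then d2 else 0) := by
  by_cases h1 : 0 ≤ d1 <;> by_cases h2 : 0 ≤ d2 <;>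
    simp [stepsB, h1, h2, PySem.List.min?] <;>
    rw [Int.min_def] <;> split_ifs <;> simp <;> omega

-- A's while loop, run with enough fuel, produces the first n diagonal squares,
-- where n is the number of steps to the first sentinel hit.
theorem loop_eq (n : Nat) : ∀ (fuel : Nat) (stopCol stopLin dc dl lin col : Int)
    (acc : List (Int × Int)),
    n ≤ fuel →
    (∀ i : Nat, i < n → col + i * dc ≠ stopCol ∧ lin + i * dl ≠ stopLin) →
    (col + n * dc = stopCol ∨ lin + n * dl = stopLin) →
    pyWhileDiag fuel stopCol stopLin dc dl lin col acc
      = acc ++ (List.range n).map (fun (i : Nat) => ((lin + ((i : Int) + 1) * dl, col + ((i : Int) + 1) * dc) : Int × Int)) := by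
  induction n with
  | zero =>
    intro fuel stopCol stopLin dc dl lin col acc _ _ hstop
    simp only [Nat.cast_zero, zero_mul, add_zero] at hstop
    cases fuel with
    | zero => simp [pyWhileDiag]
    | succ f => simp [pyWhileDiag, hstop]
  | succ m ih =>
    intro fuel stopCol stopLin dc dl lin col acc hfuel hstep hstop
    cases fuel with
    | zero => omega
    | succ f =>
      have h0 := hstep 0 (Nat.succ_pos m)
      simp only [Nat.cast_zero, zero_mul, add_zero] at h0
      have hrec := ih f stopCol stopLin dc dl (lin + dl) (col + dc)
        (acc ++ [(lin + dl, col + dc)]) (by omega)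
        (by
          intro i hi
          have := hstep (i + 1) (by omega)
          constructor
          · intro hc; apply this.1; push_cast; linarith [hc]
          · intro hc; apply this.2; push_cast; linarith [hc])
        (by
          rcases hstop with h | h
          · left; push_cast; push_cast at h; linarith [h]
          · right; push_cast; push_cast at h; linarith [h])
      simp only [pyWhileDiag, h0.1, h0.2, or_self, if_neg, not_false_iff]
      rw [hrec]
      rw [List.range_succ_eq_map]
      simp only [List.map_cons, List.map_map, List.append_assoc, List.singleton_append,
        Nat.cast_zero, zero_add, one_mul]
      congr 1
      congr 1
      apply List.map_congr_left
      intro i _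
      simp only [Function.comp_apply, Nat.cast_succ, Prod.mk.injEq]
      constructor <;> ring

-- One direction: the guarded while loop equals B's comprehension; a and b are the
-- two stopping distances, at least one of which is nonnegative under Pre_.
theorem dir_eq (sC sL dc dl Lin Col a b : Int)
    (hdc : dc = 1 ∨ dc = -1) (hdl : dl = 1 ∨ dl = -1)
    (hsC : sC = 1 ∨ sC = 8) (hsL : sL = 1 ∨ sL = 8)
    (ha : a = dc * (sC - Col)) (hb : b = dl * (sL - Lin))
    (hpre : 0 ≤ a ∨ 0 ≤ b)
    (hLb : -2147483648 ≤ Lin ∧ Lin ≤ 2147483648)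
    (hCb : -2147483648 ≤ Col ∧ Col ≤ 2147483648) :
    (if Lin ≠ sL ∨ Col ≠ sC then pyWhileDiag 8589934592 sC sL dc dl Lin Col [] else [])
      = (PySem.List.pyRange 1 (stepsB a b + 1) 1).map
          (fun k => ((Lin + k * dl, Col + k * dc) : Int × Int)) := by
  have hs := stepsB_eq a b
  rw [Int.min_def] at hs
  by_cases hg : Lin ≠ sL ∨ Col ≠ sC
  · rw [if_pos hg,
      loop_eq ((stepsB a b).toNat) 8589934592 sC sL dc dl Lin Col []
        (by rcases hdc with rfl | rfl <;> rcases hdl with rfl | rfl <;>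
              rcases hsC with rfl | rfl <;> rcases hsL with rfl | rfl <;>
              split_ifs at hs <;> omega)
        (by intro i hi
            rcases hdc with rfl | rfl <;> rcases hdl with rfl | rfl <;>
              rcases hsC with rfl | rfl <;> rcases hsL with rfl | rfl <;>
              split_ifs at hs <;> omega)
        (by rcases hdc with rfl | rfl <;> rcases hdl with rfl | rfl <;>
              rcases hsC with rfl | rfl <;> rcases hsL with rfl | rfl <;>
              split_ifs at hs <;> omega)]
    rw [PySem.List.pyRange_one]
    simp only [List.nil_append, List.map_map, add_sub_cancel_right]
    apply List.map_congr_left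
    intro i _
    simp only [Function.comp_apply, Prod.mk.injEq]
    constructor <;> ring
  · rw [not_or, not_ne_iff, not_ne_iff] at hg
    obtain ⟨hL1, hC1⟩ := hg
    have hs0 : stepsB a b = 0 := by
      subst hL1 hC1
      rcases hdc with rfl | rfl <;> rcases hdl with rfl | rfl <;>
        split_ifs at hs <;> omega
    rw [if_neg (by simp [hL1, hC1]), hs0, PySem.List.pyRange_one]
    norm_num

-- ===== VERDICT (by name: the statement is the Claim_ definition above) =====
theorem obtem_diag_spec : Claim_equal_obtem_diag := by
  intro Lin Col hdom hpre
  have hb : (-2147483648 ≤ Lin ∧ Lin ≤ 2147483648) ∧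
      (-2147483648 ≤ Col ∧ Col ≤ 2147483648) := by
    simpa [Dom_obtem_diag, pvDomInt] using hdom
  have hpre' : ((1 ≤ Lin ∧ Lin ≤ 8) ∨ (1 ≤ Col ∧ Col ≤ 8)) := hpre
  unfold Spec_obtem_diag obtem_diag obtem_diag_alt
  have h_sd := dir_eq 8 1 1 (-1) Lin Col (8 - Col) (Lin - 1)
    (Or.inl rfl) (Or.inr rfl) (Or.inr rfl) (Or.inl rfl)
    (by ring) (by ring) (by omega) hb.1 hb.2
  have h_se := dir_eq 1 1 (-1) (-1) Lin Col (Col - 1) (Lin - 1)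
    (Or.inr rfl) (Or.inr rfl) (Or.inl rfl) (Or.inl rfl)
    (by ring) (by ring) (by omega) hb.1 hb.2
  have h_id := dir_eq 8 8 1 1 Lin Col (8 - Col) (8 - Lin)
    (Or.inl rfl) (Or.inl rfl) (Or.inr rfl) (Or.inr rfl)
    (by ring) (by ring) (by omega) hb.1 hb.2
  have h_ie := dir_eq 1 8 (-1) 1 Lin Col (Col - 1) (8 - Lin)
    (Or.inr rfl) (Or.inl rfl) (Or.inl rfl) (Or.inr rfl)
    (by ring) (by ring) (by omega) hb.1 hb.2
  rw [h_sd, h_se, h_id, h_ie]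
  refine List.ext_getElem (by simp) ?_
  intro n h1 h2
  match n with
  | 0 => simp <;> (try intro a _ _) <;> first | trivial | ring | (constructor <;> ring)
  | 1 => simp <;> (try intro a _ _) <;> first | trivial | ring | (constructor <;> ring)
  | 2 => simp <;> (try intro a _ _) <;> first | trivial | ring | (constructor <;> ring)
  | 3 => simp <;> (try intro a _ _) <;> first | trivial | ring | (constructor <;> ring)
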